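-- pv_equiv track=rewrite | github.com/njharman/rpg | rpg/munge/__init__.py | by_simple_para
-- ===== SOURCE A (Python) =====
-- def by_simple_para(lines):
--     '''Combine multiple lines into one line, delineated by blank lines.'''
--     para = list()
--     for l in lines:
--         if l.strip():
--             para.append(l.strip())
--         elif para:
--             yield ' '.join(para)
--             yield ''
--             para = list()
--     if para:
--         yield ' '.join(para)
-- ===== SOURCE B (Python) =====
-- def _split_para(xs):
--     """Split xs into its leading run of non-empty strings and the rest."""
--     for i, x in enumerate(xs):
--         if not x:
--             return xs[:i], xs[i:]
--     return xs, []
--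
--
-- def by_simple_para(lines):
--     '''Combine multiple lines into one line, delineated by blank lines.'''
--     stripped = [l.strip() for l in lines]
--     while stripped:
--         if not stripped[0]:
--             stripped = stripped[1:]
--             continue
--         para, stripped = _split_para(stripped)
--         yield ' '.join(para)
--         if stripped:
--             yield ''
-- ===== Notes on version B (the rewrite author's own statement) =====
-- stated objective: alternative
-- what changed: Instead of scanning line-by-line with a pending-paragraph accumulator and end-of-input flush, B strips all lines once and then repeatedly splits off the leading run of non-empty lines, emitting each joined run and a separator only when more input follows.
import Mathlib
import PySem

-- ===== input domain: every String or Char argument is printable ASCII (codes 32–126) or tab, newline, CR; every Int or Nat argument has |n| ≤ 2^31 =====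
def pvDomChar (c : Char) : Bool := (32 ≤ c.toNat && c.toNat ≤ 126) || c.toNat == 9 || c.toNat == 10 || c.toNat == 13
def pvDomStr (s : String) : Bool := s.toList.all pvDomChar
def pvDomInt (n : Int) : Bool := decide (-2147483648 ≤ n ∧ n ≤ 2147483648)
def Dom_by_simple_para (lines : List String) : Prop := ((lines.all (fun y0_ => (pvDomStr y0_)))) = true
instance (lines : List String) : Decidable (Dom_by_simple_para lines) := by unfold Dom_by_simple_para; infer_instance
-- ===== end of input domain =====

-- B groups lines into paragraphs by splitting off leading runs of non-blank stripped lines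
-- instead of A's accumulator-and-flush scan; same values, alternative decomposition.

-- ===== PORT A =====
-- A's generator: fold over the lines carrying the pending paragraph `para`
-- (appended in order), yielding on blank lines and flushing at the end.
def goA_by_simple_para (para : List String) : List String → List String
  | [] => if para = [] then [] else [PySem.Str.join " " para]
  | l :: ls =>
    let s := PySem.Str.strip l
    if s ≠ "" then goA_by_simple_para (para ++ [s]) ls
    else if para ≠ [] then
      PySem.Str.join " " para :: "" :: goA_by_simple_para [] ls
    else goA_by_simple_para para ls

def by_simple_para (lines : List String) : List String :=
  goA_by_simple_para [] lines

-- ===== PORT B =====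
-- _split_para: leading run of non-empty strings, and the rest (first blank onwards).
def splitParaB : List String → List String × List String
  | [] => ([], [])
  | x :: xs =>
    if x ≠ "" then
      let p := splitParaB xs
      (x :: p.1, p.2)
    else ([], x :: xs)

theorem splitParaB_snd_le (xs : List String) : (splitParaB xs).2.length ≤ xs.length := by
  induction xs with
  | nil => simp [splitParaB]
  | cons x xs ih =>
    simp only [splitParaB]
    split
    · simpa using Nat.le_succ_of_le ih
    · simp

-- B's while loop over the stripped list.
def goB_by_simple_para : List String → List String
  | [] => []
  | x :: xs =>
    if x = "" then goB_by_simple_para xs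
    else
      let p := splitParaB (x :: xs)
      if p.2 = [] then [PySem.Str.join " " p.1]
      else PySem.Str.join " " p.1 :: "" :: goB_by_simple_para p.2
  termination_by xs => xs.length
  decreasing_by
  · simp
  · simp only [splitParaB]
    split
    · exact Nat.lt_succ_of_le (splitParaB_snd_le xs)
    · simp_all

def by_simple_para_alt (lines : List String) : List String :=
  goB_by_simple_para (lines.map PySem.Str.strip)

-- ===== PRECONDITION & SPEC =====
def Spec_by_simple_para (lines : List String) (out : List String) : Prop := out = by_simple_para_alt lines
instance (lines : List String) (out : List String) : Decidable (Spec_by_simple_para lines out) := by unfold Spec_by_simple_para; infer_instance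

-- ===== CLAIM (what is proved, stated in full; the proofs are below) =====
def Claim_equal_by_simple_para : Prop := ∀ (lines : List String), Dom_by_simple_para lines → Spec_by_simple_para lines (by_simple_para lines)

-- ===== LEMMAS AND PROOFS =====

theorem splitParaB_all_nonblank (para : List String) (h : ∀ s ∈ para, s ≠ "") :
    splitParaB para = (para, []) := by
  induction para with
  | nil => simp [splitParaB]
  | cons x xs ih =>
    have hx : x ≠ "" := h x (by simp)
    simp [splitParaB, hx, ih (fun s hs => h s (by simp [hs]))]

theorem splitParaB_append_blank (para t : List String) (h : ∀ s ∈ para, s ≠ "") :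
    splitParaB (para ++ "" :: t) = (para, "" :: t) := by
  induction para with
  | nil => simp [splitParaB]
  | cons x xs ih =>
    have hx : x ≠ "" := h x (by simp)
    simp [splitParaB, hx, ih (fun s hs => h s (by simp [hs]))]

theorem goB_nonblank (para : List String) (hne : para ≠ []) (h : ∀ s ∈ para, s ≠ "") :
    goB_by_simple_para para = [PySem.Str.join " " para] := by
  cases para with
  | nil => exact absurd rfl hne
  | cons x xs =>
    have hx : x ≠ "" := h x (by simp)
    rw [goB_by_simple_para]
    simp [hx, splitParaB_all_nonblank _ h]

theorem goB_para_blank (para t : List String) (hne : para ≠ []) (h : ∀ s ∈ para, s ≠ "") :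
    goB_by_simple_para (para ++ "" :: t) =
      PySem.Str.join " " para :: "" :: goB_by_simple_para t := by
  cases para with
  | nil => exact absurd rfl hne
  | cons x xs =>
    have hx : x ≠ "" := h x (by simp)
    rw [List.cons_append, goB_by_simple_para]
    rw [← List.cons_append, splitParaB_append_blank _ _ h]
    simp [hx]
    rw [goB_by_simple_para]
    simp

theorem goA_eq_goB (ls : List String) : ∀ (para : List String), (∀ s ∈ para, s ≠ "") →
    goA_by_simple_para para ls = goB_by_simple_para (para ++ ls.map PySem.Str.strip) := by
  induction ls with
  | nil =>
    intro para h
    simp only [List.map_nil, List.append_nil, goA_by_simple_para]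
    split
    · simp [goB_by_simple_para, *]
    · rw [goB_nonblank para (by assumption) h]
  | cons l ls ih =>
    intro para h
    rw [goA_by_simple_para]
    by_cases hs : PySem.Str.strip l = ""
    · simp only [hs, ne_eq, not_true_eq_false, if_false]
      by_cases hp : para = []
      · subst hp
        simp only [not_true_eq_false, if_false]
        rw [ih [] (by simp)]
        simp only [List.nil_append, List.map_cons, hs]
        rw [goB_by_simple_para]
        simp
      · simp only [hp, not_false_eq_true, if_true]
        rw [ih [] (by simp), List.map_cons, hs,
          goB_para_blank para _ hp h]
        simp
    · simp only [ne_eq, hs, not_false_eq_true, if_true]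
      rw [ih (para ++ [PySem.Str.strip l])
        (by intro s hmem; rcases List.mem_append.mp hmem with h1 | h1
            · exact h s h1
            · simp at h1; simpa [h1] using hs)]
      simp

-- ===== VERDICT (by name: the statement is the Claim_ definition above) =====
theorem by_simple_para_spec : Claim_equal_by_simple_para := by
  intro lines _
  unfold Spec_by_simple_para by_simple_para by_simple_para_alt
  simpa using goA_eq_goB lines [] (by simp)
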